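-- pv_equiv track=rewrite | github.com/Lamaw/ChartsOfLegends | Utility/PageAnalyzer.py | __capture_stat_table
-- ===== SOURCE A (Python) =====
-- def __capture_stat_table(champion_page):
--     lines = champion_page.split("\n")
--     count = 0
--     for line in lines:
--         if 'table id="champion_info-lower-preseason"' in line:
--             lines = lines[count:]
--         count += 1
--     count = 0
--     for line in lines:
--         if "</table>" in line:
--             lines = lines[:count]
--         count += 1
--     return lines
-- ===== SOURCE B (Python) =====
-- def __capture_stat_table(champion_page):
--     lines = champion_page.split("\n")
--     start = 0
--     end = None
--     for i, line in enumerate(lines):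
--         if 'table id="champion_info-lower-preseason"' in line:
--             start = i
--             end = None
--         if "</table>" in line and end is None:
--             end = i
--     return lines[start:] if end is None else lines[start:end]
-- ===== Notes on version B (the rewrite author's own statement) =====
-- stated objective: simpler
-- what changed: Replaces A's two loops that repeatedly reassign `lines` to slices of itself (with the loop counter still indexing the original list) by one enumerate pass that records the last start-marker index and the first closing-tag index after it, returning a single slice.
-- intended difference: On pages where at least two lines past the first contain the start-marker string, A's compounded `lines = lines[count:]` reslicing skips to the SUM of the marker line indices instead of the table start, returning a wrongly positioned (often empty) slice, while B captures from the last marker line, which is the intended table start. — e.g. on __capture_stat_table("x\ntable id=\"champion_info-lower-preseason\"\ntable id=\"champion_info-lower-preseason\"\n</table>"): A returns [], B returns ["table id=\"champion_info-lower-preseason\""]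
import Mathlib
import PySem

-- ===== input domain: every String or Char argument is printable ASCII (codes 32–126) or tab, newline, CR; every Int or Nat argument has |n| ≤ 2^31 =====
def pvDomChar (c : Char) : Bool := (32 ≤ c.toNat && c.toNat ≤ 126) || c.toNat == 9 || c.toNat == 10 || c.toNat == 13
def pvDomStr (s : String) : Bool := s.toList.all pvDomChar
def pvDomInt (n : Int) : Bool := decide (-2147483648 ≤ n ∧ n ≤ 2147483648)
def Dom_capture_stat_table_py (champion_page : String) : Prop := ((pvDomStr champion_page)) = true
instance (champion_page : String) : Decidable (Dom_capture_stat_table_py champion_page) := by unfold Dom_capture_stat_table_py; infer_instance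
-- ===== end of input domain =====

-- B replaces A's two reslicing loops by one enumerate pass recording the last start-marker
-- index and the first closing-tag index after it (objective: simpler); on pages with two or
-- more marker lines past the first, A's compounded reslicing is off and B differs (see D_).

def pvMarker : String := "table id=\"champion_info-lower-preseason\""
def pvEndTag : String := "</table>"
-- `champion_page.split("\n")` (both Pythons start with it)
def pvLines (champion_page : String) : List String :=
  (PySem.Str.split? champion_page "\n").getD []

-- ===== PORT A =====
-- A's first loop body: `lines = lines[count:]` on each marker hit; state = (current lines, count).
def pvStep1 (st : List String × Int) (line : String) : List String × Int :=
  (if PySem.Str.isIn pvMarker line then PySem.List.slice st.1 (some st.2) none else st.1, st.2 + 1)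
-- A's second loop body: `lines = lines[:count]` on each "</table>" hit.
def pvStep2 (st : List String × Int) (line : String) : List String × Int :=
  (if PySem.Str.isIn pvEndTag line then PySem.List.slice st.1 none (some st.2) else st.1, st.2 + 1)

def capture_stat_table_py (champion_page : String) : List String :=
  let lines0 := pvLines champion_page
  let lines1 := (lines0.foldl pvStep1 (lines0, 0)).1
  (lines1.foldl pvStep2 (lines1, 0)).1

-- ===== PORT B =====
-- B's loop body: `start = i; end = None` on a marker hit, then `end = i` on the first
-- closing tag while `end is None`; state = (start, end).
def pvStepB (st : Int × Option Int) (il : Int × String) : Int × Option Int :=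
  let st1 := if PySem.Str.isIn pvMarker il.2 then (il.1, (none : Option Int)) else st
  if PySem.Str.isIn pvEndTag il.2 && st1.2.isNone then (st1.1, some il.1) else st1

def capture_stat_table_py_alt (champion_page : String) : List String :=
  let lines := pvLines champion_page
  let st := (PySem.List.enumerate lines 0).foldl pvStepB (0, none)
  match st.2 with
  | none => PySem.List.slice lines (some st.1) none
  | some e => PySem.List.slice lines (some st.1) (some e)

-- ===== PRECONDITION & SPEC =====
-- On pages where at least two lines past the first contain the start-marker string, A's
-- compounded `lines = lines[count:]` reslicing skips to the SUM of the marker line indices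
-- instead of the table start, returning a wrongly positioned (often empty) slice, while B
-- captures from the last marker line, which is the intended table start; D_ leaves out the
-- degenerate such pages on which both captures are empty anyway (closing tag on the last
-- marker line, and A's shifted start past the end or on a closing-tag line).
def D_capture_stat_table_py (champion_page : String) : Prop :=
  let L := pvLines champion_page
  2 ≤ L.tail.countP (PySem.Str.isIn pvMarker) ∧
  ¬ ((L.filter (PySem.Str.isIn pvMarker)).getLast?.any (PySem.Str.isIn pvEndTag) ∧
     (L.drop (L.findIdxs (PySem.Str.isIn pvMarker)).sum).head?.all (PySem.Str.isIn pvEndTag))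
instance (champion_page : String) : Decidable (D_capture_stat_table_py champion_page) := by
  unfold D_capture_stat_table_py; infer_instance

def Spec_capture_stat_table_py (champion_page : String) (out : List String) : Prop :=
  ¬ D_capture_stat_table_py champion_page → out = capture_stat_table_py_alt champion_page
instance (champion_page : String) (out : List String) : Decidable (Spec_capture_stat_table_py champion_page out) := by
  unfold Spec_capture_stat_table_py; infer_instance

def pvDiffWitness_capture_stat_table_py : String :=
  "x\ntable id=\"champion_info-lower-preseason\"\ntable id=\"champion_info-lower-preseason\"\n</table>"
def pvDiffWitnessOut_capture_stat_table_py : (List String) × (List String) :=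
  ([], ["table id=\"champion_info-lower-preseason\""])

-- ===== CLAIM (what is proved, stated in full; the proofs are below) =====
def Claim_unchanged_capture_stat_table_py : Prop := ∀ (champion_page : String), Dom_capture_stat_table_py champion_page → Spec_capture_stat_table_py champion_page (capture_stat_table_py champion_page)
def Claim_changed_capture_stat_table_py : Prop := Dom_capture_stat_table_py (pvDiffWitness_capture_stat_table_py) ∧ D_capture_stat_table_py (pvDiffWitness_capture_stat_table_py) ∧ capture_stat_table_py (pvDiffWitness_capture_stat_table_py) = pvDiffWitnessOut_capture_stat_table_py.1 ∧ capture_stat_table_py_alt (pvDiffWitness_capture_stat_table_py) = pvDiffWitnessOut_capture_stat_table_py.2 ∧ pvDiffWitnessOut_capture_stat_table_py.1 ≠ pvDiffWitnessOut_capture_stat_table_py.2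
def Claim_exact_capture_stat_table_py : Prop := ∀ (champion_page : String), Dom_capture_stat_table_py champion_page → D_capture_stat_table_py champion_page → capture_stat_table_py champion_page ≠ capture_stat_table_py_alt champion_page

-- ===== LEMMAS AND PROOFS =====

-- the sum of the indices of the marker lines (where A's compounded reslicing starts)
def pvSumIdx (l : List (Int × String)) (a : Int) : Int :=
  l.foldl (fun acc il => if PySem.Str.isIn pvMarker il.2 then acc + il.1 else acc) a
def pvMarkSum (lines : List String) : Int := pvSumIdx (PySem.List.enumerate lines 0) 0

-- the first-closing-tag cut that A's second loop amounts to
def pvCut (u : List String) : List String :=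
  match u.findIdx? (fun l => PySem.Str.isIn pvEndTag l) with
  | none => u
  | some j => u.take j

-- A's second loop skips over lines without "</table>".
theorem pvA2 (xs : List String) (L : List String) (c : Int)
    (h : ∀ l ∈ xs, PySem.Str.isIn pvEndTag l = false) :
    xs.foldl pvStep2 (L, c) = (L, c + xs.length) := by
  induction xs generalizing c with
  | nil => simp
  | cons x xs ih =>
    have hx := h x (by simp)
    simp only [List.foldl_cons, pvStep2, hx, Bool.false_eq_true, if_false]
    rw [ih (c + 1) (fun l hl => h l (by simp [hl]))]
    simp; ring

-- Once count has reached the current list length, `lines[:count]` is a no-op.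
theorem pvA3 (xs : List String) (L : List String) (c : Int)
    (h : (L.length : Int) ≤ c) :
    xs.foldl pvStep2 (L, c) = (L, c + xs.length) := by
  induction xs generalizing c with
  | nil => simp
  | cons x xs ih =>
    have hc0 : 0 ≤ c := le_trans (by positivity) h
    have hsl : PySem.List.slice L none (some c) = L := by
      rw [PySem.List.slice_to L hc0]
      exact List.take_of_length_le (by omega)
    have step : pvStep2 (L, c) x = (L, c + 1) := by
      simp only [pvStep2, hsl]
      split <;> rfl
    simp only [List.foldl_cons, step]
    rw [ih (c + 1) (by omega)]
    simp; ring

-- Characterisation of A's second loop: cut at the first "</table>" line.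
theorem pvA4 (u : List String) (e : String) (v : List String)
    (hu : ∀ l ∈ u, PySem.Str.isIn pvEndTag l = false)
    (he : PySem.Str.isIn pvEndTag e = true) :
    ((u ++ e :: v).foldl pvStep2 (u ++ e :: v, 0)).1 = u := by
  rw [List.foldl_append]
  rw [pvA2 u (u ++ e :: v) 0 hu]
  have hsl : PySem.List.slice (u ++ e :: v) none (some ((0 : Int) + u.length)) = u := by
    rw [zero_add, PySem.List.slice_to_natCast, List.take_left]
  simp only [List.foldl_cons, pvStep2, he, if_true, hsl]
  rw [pvA3 v u ((0 : Int) + u.length + 1) (by omega)]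

-- Generic: findIdx? = some j splits the list at j.
theorem pvFindIdxDecomp (r : String → Bool) (xs : List String) (j : Nat)
    (h : xs.findIdx? r = some j) :
    ∃ u e v, xs = u ++ e :: v ∧ u.length = j ∧ (∀ l ∈ u, r l = false) ∧ r e = true := by
  induction xs generalizing j with
  | nil => simp at h
  | cons x xs ih =>
    rw [List.findIdx?_cons] at h
    cases hx : r x with
    | true =>
      simp [hx] at h
      exact ⟨[], x, xs, by simp, by simp [← h], by simp, hx⟩
    | false =>
      simp [hx] at h
      obtain ⟨j', hj', rfl⟩ := h
      obtain ⟨u, e, v, rfl, hlen, hu, he⟩ := ih j' hj'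
      exact ⟨x :: u, e, v, rfl, by simp [hlen], by simpa [hx] using hu, he⟩

-- Unfolding the marker-index sum one step.
theorem pvSumIdxCons (il : Int × String) (l : List (Int × String)) (a : Int) :
    pvSumIdx (il :: l) a = pvSumIdx l (if PySem.Str.isIn pvMarker il.2 then a + il.1 else a) := rfl

-- The marker-index sum: pulling the accumulator out front.
theorem pvSumShift (l : List (Int × String)) (a : Int) :
    pvSumIdx l a = a + pvSumIdx l 0 := by
  induction l generalizing a with
  | nil => simp [pvSumIdx]
  | cons il l ih =>
    rw [pvSumIdxCons, pvSumIdxCons]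
    cases hm : PySem.Str.isIn pvMarker il.2 with
    | true => simp only [if_true]; rw [ih (a + il.1), ih (0 + il.1)]; ring
    | false => simp only [Bool.false_eq_true, if_false]; rw [ih a]

-- The marker-index sum over enumerate from a nonnegative start is nonnegative.
theorem pvSumNonneg (xs : List String) (c : Int) (hc : 0 ≤ c) :
    0 ≤ pvSumIdx (PySem.List.enumerate xs c) 0 := by
  induction xs generalizing c with
  | nil => simp [pvSumIdx, PySem.List.enumerate_nil]
  | cons x xs ih =>
    rw [PySem.List.enumerate_cons, pvSumIdxCons]
    cases hm : PySem.Str.isIn pvMarker x with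
    | true =>
      simp only [if_true]
      rw [pvSumShift]
      have := ih (c + 1) (by omega)
      omega
    | false =>
      simp only [Bool.false_eq_true, if_false]
      exact ih (c + 1) (by omega)

-- No marker lines: the sum is the accumulator.
theorem pvSumZero (xs : List String) (c a : Int)
    (h : ∀ l ∈ xs, PySem.Str.isIn pvMarker l = false) :
    pvSumIdx (PySem.List.enumerate xs c) a = a := by
  induction xs generalizing c a with
  | nil => simp [pvSumIdx, PySem.List.enumerate_nil]
  | cons x xs ih =>
    have hx := h x (by simp)
    rw [PySem.List.enumerate_cons, pvSumIdxCons]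
    simp only [hx, Bool.false_eq_true, if_false]
    exact ih (c + 1) a (fun l hl => h l (by simp [hl]))

-- A's first loop, run from any dropped suffix, drops exactly the sum of the hit indices more.
theorem pvPhase1 (xs : List String) (lines : List String) (o : Nat) (c : Int) (hc : 0 ≤ c) :
    xs.foldl pvStep1 (lines.drop o, c) =
      (lines.drop (o + (pvSumIdx (PySem.List.enumerate xs c) 0).toNat), c + xs.length) := by
  induction xs generalizing o c with
  | nil => simp [pvSumIdx, PySem.List.enumerate_nil]
  | cons x xs ih =>
    rw [PySem.List.enumerate_cons, pvSumIdxCons]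
    cases hm : PySem.Str.isIn pvMarker x with
    | false =>
      have hm' : PySem.Chars.isIn pvMarker.toList x.toList = false := by simpa using hm
      have hstep : pvStep1 (lines.drop o, c) x = (lines.drop o, c + 1) := by
        simp [pvStep1, hm']
      simp only [Bool.false_eq_true, if_false, List.foldl_cons]
      rw [hstep, ih o (c + 1) (by omega), Prod.mk.injEq]
      exact ⟨rfl, by simp; ring⟩
    | true =>
      have hstep : pvStep1 (lines.drop o, c) x = (lines.drop (o + c.toNat), c + 1) := by
        simp only [pvStep1, hm, if_true]
        rw [PySem.List.slice_from _ hc, List.drop_drop]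
      simp only [if_true, List.foldl_cons]
      rw [hstep, ih (o + c.toNat) (c + 1) (by omega), Prod.mk.injEq]
      have hnn := pvSumNonneg xs (c + 1) (by omega)
      rw [pvSumShift (PySem.List.enumerate xs (c + 1)) (0 + c)]
      exact ⟨by congr 1; omega, by simp; ring⟩

-- A equals: drop the marker-index sum, then cut at the first closing tag.
theorem pvAeq (page : String) :
    capture_stat_table_py page =
      pvCut (((pvLines page).drop
        (pvMarkSum (pvLines page)).toNat)) := by
  unfold capture_stat_table_py
  set lines := pvLines page with hl
  have h1 : (lines.foldl pvStep1 (lines, 0)).1 = lines.drop (pvMarkSum lines).toNat := by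
    have := pvPhase1 lines lines 0 0 le_rfl
    simp only [List.drop_zero, Nat.zero_add] at this
    rw [this]; rfl
  simp only [h1]
  set kept := lines.drop (pvMarkSum lines).toNat with hk
  unfold pvCut
  cases hq : kept.findIdx? (fun l => PySem.Str.isIn pvEndTag l) with
  | none =>
    have hnq := List.findIdx?_eq_none_iff.mp hq
    rw [pvA2 _ _ 0 hnq]
  | some j =>
    obtain ⟨u, e, v, heq, rfl, hu, he⟩ := pvFindIdxDecomp _ _ _ hq
    rw [heq, pvA4 u e v hu he]
    show u = List.take u.length (u ++ e :: v)
    rw [List.take_left]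

-- B's fold keeps a set end over marker-free lines.
theorem pvBstay (xs : List String) (c s e : Int)
    (h : ∀ l ∈ xs, PySem.Str.isIn pvMarker l = false) :
    (PySem.List.enumerate xs c).foldl pvStepB (s, some e) = (s, some e) := by
  induction xs generalizing c with
  | nil => simp [PySem.List.enumerate_nil]
  | cons x xs ih =>
    have hx : PySem.Chars.isIn pvMarker.toList x.toList = false := by
      simpa using h x (by simp)
    rw [PySem.List.enumerate_cons, List.foldl_cons]
    have : pvStepB (s, some e) (c, x) = (s, some e) := by
      simp [pvStepB, hx]
    rw [this]
    exact ih (c + 1) (fun l hl => h l (by simp [hl]))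

-- B's fold over marker-free lines from an unset end: first closing tag wins.
theorem pvBnone (xs : List String) (c s : Int)
    (h : ∀ l ∈ xs, PySem.Str.isIn pvMarker l = false) :
    (PySem.List.enumerate xs c).foldl pvStepB (s, none) =
      (s, (xs.findIdx? (fun l => PySem.Str.isIn pvEndTag l)).map (fun j : Nat => c + (j : Int))) := by
  induction xs generalizing c with
  | nil => simp [PySem.List.enumerate_nil]
  | cons x xs ih =>
    have hx : PySem.Chars.isIn pvMarker.toList x.toList = false := by
      simpa using h x (by simp)
    rw [PySem.List.enumerate_cons, List.foldl_cons, List.findIdx?_cons]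
    cases hq : PySem.Str.isIn pvEndTag x with
    | true =>
      have hq' : PySem.Chars.isIn pvEndTag.toList x.toList = true := by simpa using hq
      have : pvStepB (s, none) (c, x) = (s, some c) := by
        simp [pvStepB, hx, hq']
      rw [this, pvBstay xs (c + 1) s c (fun l hl => h l (by simp [hl]))]
      simp
    | false =>
      have hq' : PySem.Chars.isIn pvEndTag.toList x.toList = false := by simpa using hq
      have : pvStepB (s, none) (c, x) = (s, none) := by
        simp [pvStepB, hx, hq']
      rw [this, ih (c + 1) (fun l hl => h l (by simp [hl]))]
      simp only [Bool.false_eq_true, if_false, Prod.mk.injEq, true_and]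
      cases xs.findIdx? (fun l => PySem.Str.isIn pvEndTag l) with
      | none => simp
      | some j => simp only [Option.map_some, Option.some.injEq]; omega

-- Either no marker line at all, or split at the LAST marker line.
theorem pvLastDecomp (p : String → Bool) (xs : List String) :
    (∀ l ∈ xs, p l = false) ∨
      ∃ u m v, xs = u ++ m :: v ∧ p m = true ∧ ∀ l ∈ v, p l = false := by
  induction xs with
  | nil => exact Or.inl (by simp)
  | cons x xs ih =>
    rcases ih with hall | ⟨u, m, v, rfl, hm, hv⟩
    · cases hx : p x with
      | true => exact Or.inr ⟨[], x, xs, by simp, hx, hall⟩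
      | false =>
        refine Or.inl ?_
        intro l hl
        rcases List.mem_cons.mp hl with hl | hl
        · rw [hl]; exact hx
        · exact hall l hl
    · exact Or.inr ⟨x :: u, m, v, rfl, hm, hv⟩

-- B's final state when lines split at the last marker line.
theorem pvBsplit (u : List String) (m : String) (v : List String)
    (hm : PySem.Str.isIn pvMarker m = true)
    (hv : ∀ l ∈ v, PySem.Str.isIn pvMarker l = false) :
    (PySem.List.enumerate (u ++ m :: v) 0).foldl pvStepB (0, none) =
      ((u.length : Int),
        if PySem.Str.isIn pvEndTag m then some (u.length : Int)
        else ((v.findIdx? (fun l => PySem.Str.isIn pvEndTag l)).map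
          (fun j : Nat => (u.length : Int) + 1 + (j : Int)))) := by
  rw [PySem.List.enumerate_append, List.foldl_append, PySem.List.enumerate_cons, List.foldl_cons]
  set stu := (PySem.List.enumerate u 0).foldl pvStepB (0, none) with hstu
  have hm' : PySem.Chars.isIn pvMarker.toList m.toList = true := by simpa using hm
  cases hq : PySem.Str.isIn pvEndTag m with
  | true =>
    have hq' : PySem.Chars.isIn pvEndTag.toList m.toList = true := by simpa using hq
    have : pvStepB stu ((0 : Int) + u.length, m) = ((u.length : Int), some (u.length : Int)) := by
      simp [pvStepB, hm', hq']
    rw [this, pvBstay v ((0 : Int) + u.length + 1) _ _ hv]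
    simp
  | false =>
    have hq' : PySem.Chars.isIn pvEndTag.toList m.toList = false := by simpa using hq
    have : pvStepB stu ((0 : Int) + u.length, m) = ((u.length : Int), none) := by
      simp [pvStepB, hm', hq']
    rw [this, pvBnone v ((0 : Int) + u.length + 1) _ hv]
    simp only [Bool.false_eq_true, if_false, Prod.mk.injEq, true_and]
    cases v.findIdx? (fun l => PySem.Str.isIn pvEndTag l) with
    | none => simp
    | some j => simp only [Option.map_some, Option.some.injEq]; omega

-- B on a page with no marker lines.
theorem pvBeqNoMark (lines : List String)
    (h : ∀ l ∈ lines, PySem.Str.isIn pvMarker l = false) (page : String)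
    (hl : pvLines page = lines) :
    capture_stat_table_py_alt page = pvCut lines := by
  unfold capture_stat_table_py_alt
  rw [hl]
  show (match ((PySem.List.enumerate lines 0).foldl pvStepB ((0 : Int), (none : Option Int))).2 with
        | none => PySem.List.slice lines (some ((PySem.List.enumerate lines 0).foldl pvStepB ((0 : Int), (none : Option Int))).1) none
        | some e => PySem.List.slice lines (some ((PySem.List.enumerate lines 0).foldl pvStepB ((0 : Int), (none : Option Int))).1) (some e)) = pvCut lines
  rw [pvBnone lines 0 0 h]
  unfold pvCut
  cases hq : lines.findIdx? (fun l => PySem.Str.isIn pvEndTag l) with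
  | none => simp
  | some j =>
    simp only [Option.map_some]
    rw [show (0 : Int) + (j : Int) = ((j : Nat) : Int) by omega]
    simp [PySem.List.slice_to_natCast]

-- B on a page split at its last marker line.
theorem pvBeqMark (u : List String) (m : String) (v : List String)
    (hm : PySem.Str.isIn pvMarker m = true)
    (hv : ∀ l ∈ v, PySem.Str.isIn pvMarker l = false) (page : String)
    (hl : pvLines page = u ++ m :: v) :
    capture_stat_table_py_alt page =
      (if PySem.Str.isIn pvEndTag m then []
       else match v.findIdx? (fun l => PySem.Str.isIn pvEndTag l) with
         | none => m :: v
         | some j => m :: v.take j) := by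
  unfold capture_stat_table_py_alt
  rw [hl]
  show (match ((PySem.List.enumerate (u ++ m :: v) 0).foldl pvStepB ((0 : Int), (none : Option Int))).2 with
        | none => PySem.List.slice (u ++ m :: v) (some ((PySem.List.enumerate (u ++ m :: v) 0).foldl pvStepB ((0 : Int), (none : Option Int))).1) none
        | some e => PySem.List.slice (u ++ m :: v) (some ((PySem.List.enumerate (u ++ m :: v) 0).foldl pvStepB ((0 : Int), (none : Option Int))).1) (some e)) = _
  rw [pvBsplit u m v hm hv]
  cases hq : PySem.Str.isIn pvEndTag m with
  | true =>
    simp only [if_true]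
    rw [PySem.List.slice_natCast]
    simp
  | false =>
    simp only [Bool.false_eq_true, if_false]
    cases hfq : v.findIdx? (fun l => PySem.Str.isIn pvEndTag l) with
    | none =>
      simp only [Option.map_none]
      rw [PySem.List.slice_from_natCast, List.drop_left' rfl]
    | some j =>
      simp only [Option.map_some]
      rw [show (u.length : Int) + 1 + (j : Int) = ((u.length + 1 + j : Nat) : Int) by push_cast; ring]
      rw [PySem.List.slice_natCast, List.drop_left' rfl]
      have : u.length + 1 + j - u.length = 1 + j := by omega
      rw [this]
      simp [Nat.add_comm 1 j]

-- The marker-index sum of lines split at the last marker line.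
theorem pvSumSplitEq (u : List String) (m : String) (v : List String)
    (hm : PySem.Str.isIn pvMarker m = true)
    (hv : ∀ l ∈ v, PySem.Str.isIn pvMarker l = false) :
    pvMarkSum (u ++ m :: v) = pvSumIdx (PySem.List.enumerate u 0) 0 + u.length := by
  unfold pvMarkSum
  rw [PySem.List.enumerate_append, PySem.List.enumerate_cons]
  unfold pvSumIdx
  rw [List.foldl_append, List.foldl_cons]
  change pvSumIdx (PySem.List.enumerate v ((0:Int) + u.length + 1))
      (if PySem.Str.isIn pvMarker m then pvSumIdx (PySem.List.enumerate u 0) 0 + ((0:Int) + u.length) else pvSumIdx (PySem.List.enumerate u 0) 0) = _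
  simp only [hm, if_true]
  rw [pvSumZero v _ _ hv]
  show pvSumIdx (PySem.List.enumerate u 0) 0 + ((0 : Int) + u.length)
      = pvSumIdx (PySem.List.enumerate u 0) 0 + (u.length : Int)
  ring

-- ... and when no earlier marker sits past index 0, it is exactly the last marker's index.
theorem pvSumSplit (u : List String) (m : String) (v : List String)
    (hm : PySem.Str.isIn pvMarker m = true)
    (hv : ∀ l ∈ v, PySem.Str.isIn pvMarker l = false)
    (hu : ∀ l ∈ u.drop 1, PySem.Str.isIn pvMarker l = false) :
    pvMarkSum (u ++ m :: v) = (u.length : Int) := by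
  rw [pvSumSplitEq u m v hm hv]
  have hsu : pvSumIdx (PySem.List.enumerate u 0) 0 = 0 := by
    cases u with
    | nil => simp [pvSumIdx, PySem.List.enumerate_nil]
    | cons x u' =>
      rw [PySem.List.enumerate_cons, pvSumIdxCons]
      have h0 : (if PySem.Str.isIn pvMarker x then (0 : Int) + 0 else 0) = 0 := by
        split <;> rfl
      rw [h0]
      exact pvSumZero u' 1 0 (by simpa using hu)
  rw [hsu]
  ring

-- The Nat-valued index sum in D_ agrees with the Int-valued one.
theorem pvSumFind (xs : List String) (c : Nat) :
    pvSumIdx (PySem.List.enumerate xs (c : Int)) 0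
      = ((xs.findIdxs (PySem.Str.isIn pvMarker) c).sum : Int) := by
  induction xs generalizing c with
  | nil => simp [pvSumIdx, PySem.List.enumerate_nil, List.findIdxs]
  | cons x xs ih =>
    rw [PySem.List.enumerate_cons, pvSumIdxCons, List.findIdxs_cons]
    cases hm : PySem.Str.isIn pvMarker x with
    | true =>
      simp only [if_true]
      rw [pvSumShift, show ((c : Nat) : Int) + 1 = ((c + 1 : Nat) : Int) by push_cast; ring,
        ih (c + 1), List.sum_cons]
      push_cast
      ring
    | false =>
      simp only [Bool.false_eq_true, if_false]
      rw [show ((c : Nat) : Int) + 1 = ((c + 1 : Nat) : Int) by push_cast; ring]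
      exact ih (c + 1)

theorem pvSumNat (L : List String) :
    (L.findIdxs (PySem.Str.isIn pvMarker)).sum = (pvMarkSum L).toNat := by
  have h := pvSumFind L 0
  simp only [Nat.cast_zero] at h
  unfold pvMarkSum
  omega

-- A marker line with index ≥ 1 makes the sum strictly larger than the accumulator.
theorem pvSumLB (xs : List String) (c a : Int) (hc : 1 ≤ c)
    (h : ∃ l ∈ xs, PySem.Str.isIn pvMarker l = true) :
    a + 1 ≤ pvSumIdx (PySem.List.enumerate xs c) a := by
  induction xs generalizing c a with
  | nil => simp at h
  | cons x xs ih =>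
    rw [PySem.List.enumerate_cons, pvSumIdxCons]
    cases hm : PySem.Str.isIn pvMarker x with
    | true =>
      simp only [if_true]
      rw [pvSumShift]
      have := pvSumNonneg xs (c + 1) (by omega)
      omega
    | false =>
      simp only [Bool.false_eq_true, if_false]
      rcases h with ⟨l, hl, hml⟩
      rcases List.mem_cons.mp hl with hl | hl
      · rw [hl] at hml; rw [hml] at hm; cases hm
      · exact ih (c + 1) a (by omega) ⟨l, hl, hml⟩

-- A cut list starting with a non-closing-tag line is nonempty …
theorem pvCutNeNil (l : String) (rest : List String)
    (hql : PySem.Str.isIn pvEndTag l = false) : pvCut (l :: rest) ≠ [] := by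
  have hql' : PySem.Chars.isIn pvEndTag.toList l.toList = false := by simpa using hql
  unfold pvCut
  rw [List.findIdx?_cons]
  simp only [hql, Bool.false_eq_true, if_false]
  cases rest.findIdx? (fun l => PySem.Str.isIn pvEndTag l) with
  | none => simp
  | some j => simp [List.take_succ_cons]

-- … and one starting with a closing-tag line is empty.
theorem pvCutNil (l : String) (rest : List String)
    (hql : PySem.Str.isIn pvEndTag l = true) : pvCut (l :: rest) = [] := by
  have hql' : PySem.Chars.isIn pvEndTag.toList l.toList = true := by simpa using hql
  unfold pvCut
  rw [List.findIdx?_cons]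
  simp [hql']

-- The last marker line is the last element of the marker filter.
theorem pvFilterLast (u : List String) (m : String) (v : List String)
    (hm : PySem.Str.isIn pvMarker m = true)
    (hv : ∀ l ∈ v, PySem.Str.isIn pvMarker l = false) :
    ((u ++ m :: v).filter (PySem.Str.isIn pvMarker)).getLast? = some m := by
  rw [List.filter_append]
  have hfv : v.filter (fun l => PySem.Str.isIn pvMarker l) = [] :=
    List.filter_eq_nil_iff.mpr (fun l hl => by simpa using hv l hl)
  rw [List.filter_cons_of_pos hm, hfv]
  simp

-- ===== VERDICT (by name: the statement is the Claim_ definition above) =====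
theorem capture_stat_table_py_spec : Claim_unchanged_capture_stat_table_py := by
  intro page _
  unfold Spec_capture_stat_table_py
  intro hnD
  rw [pvAeq]
  set lines := pvLines page with hl
  rcases pvLastDecomp (fun l => PySem.Str.isIn pvMarker l) lines with hall | ⟨u, m, v, hsplit, hm, hv⟩
  · have hS : pvMarkSum lines = 0 := pvSumZero lines 0 0 hall
    rw [hS]
    simp only [Int.toNat_zero, List.drop_zero]
    exact (pvBeqNoMark lines hall page hl.symm).symm
  · unfold D_capture_stat_table_py at hnD
    simp only [← hl, ← List.drop_one] at hnD
    by_cases htwo : 2 ≤ (lines.drop 1).countP (fun l => PySem.Str.isIn pvMarker l)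
    · -- degenerate region of the carve-out: both captures are empty
      have hboth := not_not.mp fun hc => hnD ⟨htwo, hc⟩
      have hfl : (lines.filter (PySem.Str.isIn pvMarker)).getLast? = some m := by
        rw [hsplit]; exact pvFilterLast u m v hm hv
      have hQm : PySem.Str.isIn pvEndTag m = true := by
        have hb := hboth.1
        rw [hfl] at hb
        simpa using hb
      have hAe := hboth.2
      rw [pvSumNat lines] at hAe
      have hB : capture_stat_table_py_alt page = [] := by
        rw [pvBeqMark u m v hm hv page (by rw [← hl]; exact hsplit), hQm]
        simp
      rw [hB]
      cases hd : lines.drop (pvMarkSum lines).toNat with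
      | nil => rfl
      | cons l rest =>
        rw [hd] at hAe
        simp only [List.head?_cons, Option.all_some] at hAe
        exact pvCutNil l rest hAe
    · have hu : ∀ l ∈ u.drop 1, PySem.Str.isIn pvMarker l = false := by
        intro l hlmem
        cases u with
        | nil => simp at hlmem
        | cons x u' =>
          simp only [List.drop_succ_cons, List.drop_zero] at hlmem
          by_contra hP
          have hPl : PySem.Str.isIn pvMarker l = true := by
            revert hP
            cases PySem.Str.isIn pvMarker l <;> simp
          apply htwo
          have hd : lines.drop 1 = u' ++ m :: v := by rw [hsplit]; rfl
          rw [hd, List.countP_append, List.countP_cons]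
          have h1 : 0 < u'.countP (fun l => PySem.Str.isIn pvMarker l) :=
            List.countP_pos_iff.mpr ⟨l, hlmem, hPl⟩
          simp only [hm, if_true]
          omega
      have hS : pvMarkSum lines = (u.length : Int) := by
        rw [hsplit]; exact pvSumSplit u m v hm hv hu
      have hSn : (pvMarkSum lines).toNat = u.length := by rw [hS]; omega
      rw [hSn, hsplit, List.drop_left' rfl,
        pvBeqMark u m v hm hv page (by rw [← hl]; exact hsplit)]
      cases hQm : PySem.Str.isIn pvEndTag m with
      | true =>
        have hQm' : PySem.Chars.isIn pvEndTag.toList m.toList = true := by simpa using hQm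
        unfold pvCut
        rw [List.findIdx?_cons]
        simp [hQm']
      | false =>
        have hQm' : PySem.Chars.isIn pvEndTag.toList m.toList = false := by simpa using hQm
        simp only [Bool.false_eq_true, if_false]
        unfold pvCut
        rw [List.findIdx?_cons]
        cases hfq : v.findIdx? (fun l => PySem.Str.isIn pvEndTag l) with
        | none =>
          have hfq' : v.findIdx? (fun l => PySem.Chars.isIn pvEndTag.toList l.toList) = none := by
            simpa using hfq
          simp [hQm']
        | some j =>
          have hfq' : v.findIdx? (fun l => PySem.Chars.isIn pvEndTag.toList l.toList) = some j := by
            simpa using hfq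
          simp [hQm', List.take_succ_cons]

theorem capture_stat_table_py_changed : Claim_changed_capture_stat_table_py := by
  unfold Claim_changed_capture_stat_table_py; decide

theorem capture_stat_table_py_tight : Claim_exact_capture_stat_table_py := by
  intro page _ hD
  unfold D_capture_stat_table_py at hD
  rw [pvAeq]
  set lines := pvLines page with hl
  simp only [← List.drop_one] at hD
  obtain ⟨htwo, hne⟩ := hD
  rcases pvLastDecomp (fun l => PySem.Str.isIn pvMarker l) lines with hall | ⟨u, m, v, hsplit, hm, hv⟩
  · exfalso
    have h0 : (lines.drop 1).countP (PySem.Str.isIn pvMarker) = 0 :=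
      List.countP_eq_zero.mpr fun l hlm => by
        simpa using hall l (List.mem_of_mem_drop hlm)
    omega
  · have hfl : (lines.filter (fun l => PySem.Str.isIn pvMarker l)).getLast? = some m := by
      rw [hsplit]; exact pvFilterLast u m v hm hv
    have hBval := pvBeqMark u m v hm hv page (by rw [← hl]; exact hsplit)
    cases hQm : PySem.Str.isIn pvEndTag m with
    | true =>
      -- B's capture is empty; D_ then guarantees A's is not
      have hBe : (lines.filter (PySem.Str.isIn pvMarker)).getLast?.any
          (PySem.Str.isIn pvEndTag) = true := by
        rw [hfl]; simpa using hQm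
      have hAe : (lines.drop (lines.findIdxs (PySem.Str.isIn pvMarker)).sum).head?.all
          (PySem.Str.isIn pvEndTag) = false := by
        cases h : (lines.drop (lines.findIdxs (PySem.Str.isIn pvMarker)).sum).head?.all
            (PySem.Str.isIn pvEndTag) with
        | false => rfl
        | true => exact absurd ⟨hBe, h⟩ hne
      rw [pvSumNat lines] at hAe
      have hBnil : capture_stat_table_py_alt page = [] := by
        rw [hBval, hQm]; simp
      rw [hBnil]
      cases hd : lines.drop (pvMarkSum lines).toNat with
      | nil => rw [hd] at hAe; simp at hAe
      | cons l rest =>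
        rw [hd] at hAe
        simp only [List.head?_cons, Option.all_some] at hAe
        exact pvCutNeNil l rest hAe
    | false =>
      -- B starts with the last marker line; A's capture lies wholly past it
      intro heq
      have hSge : (u.length : Int) + 1 ≤ pvMarkSum lines := by
        cases u with
        | nil =>
          exfalso
          have hd : lines.drop 1 = v := by rw [hsplit]; rfl
          have h0 : (lines.drop 1).countP (PySem.Str.isIn pvMarker) = 0 := by
            rw [hd]; exact List.countP_eq_zero.mpr fun l hlm => by simpa using hv l hlm
          omega
        | cons x u' =>
          have hd : lines.drop 1 = u' ++ m :: v := by rw [hsplit]; rfl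
          have hcnt : 1 ≤ u'.countP (PySem.Str.isIn pvMarker) := by
            rw [hd, List.countP_append, List.countP_cons] at htwo
            simp only [hm, if_true] at htwo
            have hcv : v.countP (PySem.Str.isIn pvMarker) = 0 :=
              List.countP_eq_zero.mpr fun l hlm => by simpa using hv l hlm
            omega
          obtain ⟨l, hlm, hPl⟩ :=
            List.countP_pos_iff.mp (Nat.lt_of_lt_of_le Nat.zero_lt_one hcnt)
          have hPl' : PySem.Str.isIn pvMarker l = true := hPl
          have hS : pvMarkSum lines =
              pvSumIdx (PySem.List.enumerate (x :: u') 0) 0 + (x :: u').length := by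
            rw [hsplit]; exact pvSumSplitEq (x :: u') m v hm hv
          have hLB : (0 : Int) + 1 ≤ pvSumIdx (PySem.List.enumerate (x :: u') 0) 0 := by
            rw [PySem.List.enumerate_cons, pvSumIdxCons]
            have h0 : (if PySem.Str.isIn pvMarker x then (0 : Int) + 0 else 0) = 0 := by
              split <;> rfl
            rw [h0]
            exact pvSumLB u' 1 0 le_rfl ⟨l, hlm, hPl'⟩
          rw [hS]
          simp only [List.length_cons]
          push_cast
          omega
      have hS0 : 0 ≤ pvMarkSum lines := by
        rw [hl]; exact pvSumNonneg _ 0 le_rfl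
      have hbase : (u ++ m :: v).drop (u.length + 1) = v := by
        have huv : u ++ m :: v = (u ++ [m]) ++ v := by simp
        rw [huv]
        exact List.drop_left' (by simp)
      obtain ⟨r, hr⟩ : ∃ r, (pvMarkSum lines).toNat = (u.length + 1) + r :=
        ⟨(pvMarkSum lines).toNat - (u.length + 1), by omega⟩
      have hsub : lines.drop (pvMarkSum lines).toNat = v.drop r := by
        rw [hr, hsplit, ← List.drop_drop, hbase]
      have hmB : m ∈ capture_stat_table_py_alt page := by
        rw [hBval, hQm]
        simp only [Bool.false_eq_true, if_false]
        cases v.findIdx? (fun l => PySem.Str.isIn pvEndTag l) <;> simp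
      rw [← heq] at hmB
      have hmkept : m ∈ lines.drop (pvMarkSum lines).toNat := by
        revert hmB
        unfold pvCut
        cases lines.drop (pvMarkSum lines).toNat |>.findIdx? (fun l => PySem.Str.isIn pvEndTag l) with
        | none => exact id
        | some j => exact fun h => List.mem_of_mem_take h
      rw [hsub] at hmkept
      have hmv : m ∈ v := List.mem_of_mem_drop hmkept
      rw [hv m hmv] at hm
      cases hm
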